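-- pv_equiv track=rewrite | github.com/MinhSkyDev/RookPolyminalSolver | RookPolynomial.py | add2Vector
-- ===== SOURCE A (Python) =====
-- def add2Vector(subPoly_1,subPoly_2):
--     add = []
--     minSize = min(len(subPoly_1),len(subPoly_2))
--     for i in range(0,minSize):
--         current = subPoly_1[i] + subPoly_2[i]
--         add.append(current)
--
--     if(minSize<len(subPoly_1)):
--         for i in range(minSize,len(subPoly_1)):
--             add.append(subPoly_1[i])
--     if(minSize < len(subPoly_2)):
--         for i in range(minSize,len(subPoly_2)):
--             add.append(subPoly_2[i])
--
--     return add
-- ===== SOURCE B (Python) =====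
-- from itertools import zip_longest
--
-- def add2Vector(subPoly_1, subPoly_2):
--     return [a + b for a, b in zip_longest(subPoly_1, subPoly_2, fillvalue=0)]
-- ===== Notes on version B (the rewrite author's own statement) =====
-- stated objective: idiomatic
-- what changed: Replaced the three-phase body (min-length paired loop plus two conditional tail-copy loops) with a single comprehension over itertools.zip_longest with fillvalue=0, one uniform padded pass.
import Mathlib
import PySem

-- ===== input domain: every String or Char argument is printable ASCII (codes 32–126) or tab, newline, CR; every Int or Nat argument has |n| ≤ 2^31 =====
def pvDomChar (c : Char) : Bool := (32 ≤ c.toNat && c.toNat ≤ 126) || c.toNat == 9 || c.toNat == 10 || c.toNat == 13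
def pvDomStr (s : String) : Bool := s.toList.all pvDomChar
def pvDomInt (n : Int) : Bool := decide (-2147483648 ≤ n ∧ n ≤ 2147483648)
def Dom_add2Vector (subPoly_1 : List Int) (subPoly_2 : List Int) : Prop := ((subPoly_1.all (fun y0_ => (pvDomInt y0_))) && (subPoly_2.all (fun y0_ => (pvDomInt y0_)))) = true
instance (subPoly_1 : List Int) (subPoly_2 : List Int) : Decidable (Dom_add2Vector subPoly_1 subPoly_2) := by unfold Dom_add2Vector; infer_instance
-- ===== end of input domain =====

-- B replaces A's three-phase body (min-length paired loop + two conditional tail loops)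
-- with one uniform zero-padded pass (zip_longest); return values are identical, objective: idiomatic.

-- ===== PORT A =====
def add2Vector (subPoly_1 : List Int) (subPoly_2 : List Int) : List Int :=
  let add : List Int := []
  let minSize : Int := min (subPoly_1.length : Int) (subPoly_2.length : Int)
  let add := (PySem.List.pyRange 0 minSize 1).foldl
    (fun add i => add ++ [PySem.List.pyGetD subPoly_1 i 0 + PySem.List.pyGetD subPoly_2 i 0]) add
  let add := if minSize < (subPoly_1.length : Int) then
      (PySem.List.pyRange minSize (subPoly_1.length : Int) 1).foldl
        (fun add i => add ++ [PySem.List.pyGetD subPoly_1 i 0]) add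
    else add
  let add := if minSize < (subPoly_2.length : Int) then
      (PySem.List.pyRange minSize (subPoly_2.length : Int) 1).foldl
        (fun add i => add ++ [PySem.List.pyGetD subPoly_2 i 0]) add
    else add
  add

-- ===== PORT B =====
-- transliteration of Source B: one pass over the zero-padded zip of the two lists
def add2Vector_alt (subPoly_1 : List Int) (subPoly_2 : List Int) : List Int :=
  match subPoly_1, subPoly_2 with
  | [], [] => []
  | [], b :: t2 => (0 + b) :: add2Vector_alt [] t2
  | a :: t1, [] => (a + 0) :: add2Vector_alt t1 []
  | a :: t1, b :: t2 => (a + b) :: add2Vector_alt t1 t2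

-- ===== PRECONDITION & SPEC =====
def Spec_add2Vector (subPoly_1 : List Int) (subPoly_2 : List Int) (out : List Int) : Prop := out = add2Vector_alt subPoly_1 subPoly_2
instance (subPoly_1 : List Int) (subPoly_2 : List Int) (out : List Int) : Decidable (Spec_add2Vector subPoly_1 subPoly_2 out) := by unfold Spec_add2Vector; infer_instance

-- ===== CLAIM (what is proved, stated in full; the proofs are below) =====
def Claim_equal_add2Vector : Prop := ∀ (subPoly_1 : List Int) (subPoly_2 : List Int), Dom_add2Vector subPoly_1 subPoly_2 → Spec_add2Vector subPoly_1 subPoly_2 (add2Vector subPoly_1 subPoly_2)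

-- ===== LEMMAS AND PROOFS =====

-- B equals zipWith (+) on the common prefix followed by the two (at most one nonempty) tails
theorem alt_nil_right (s : List Int) : add2Vector_alt s [] = s := by
  induction s with
  | nil => simp [add2Vector_alt]
  | cons a t ih => simp [add2Vector_alt, ih]

theorem alt_nil_left (s : List Int) : add2Vector_alt [] s = s := by
  induction s with
  | nil => simp [add2Vector_alt]
  | cons a t ih => simp [add2Vector_alt, ih]

theorem alt_eq (s1 : List Int) : ∀ s2 : List Int,
    add2Vector_alt s1 s2 =
      List.zipWith (· + ·) s1 s2
        ++ s1.drop (min s1.length s2.length) ++ s2.drop (min s1.length s2.length) := by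
  induction s1 with
  | nil => intro s2; simp [alt_nil_left]
  | cons a t1 ih =>
    intro s2
    cases s2 with
    | nil => simp [alt_nil_right]
    | cons b t2 => simp [add2Vector_alt, ih t2, Nat.succ_min_succ]

-- the common-prefix map of A equals zipWith (+)
theorem range_map_eq_zipWith (s1 : List Int) : ∀ s2 : List Int,
    (List.range (min s1.length s2.length)).map (fun k => s1.getD k 0 + s2.getD k 0)
      = List.zipWith (· + ·) s1 s2 := by
  induction s1 with
  | nil => intro s2; simp
  | cons a t1 ih =>
    intro s2
    cases s2 with
    | nil => simp
    | cons b t2 =>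
      have := ih t2
      simp [Nat.succ_min_succ, List.range_succ_eq_map, List.map_map, Function.comp_def] at this ⊢
      exact this

theorem add2Vector_spec : Claim_equal_add2Vector := by
  unfold Claim_equal_add2Vector
  intro s1 s2 _
  unfold Spec_add2Vector add2Vector
  simp only []
  have hm : min ((s1.length : Int)) ((s2.length : Int)) = ((min s1.length s2.length : Nat) : Int) := by
    push_cast; rfl
  rw [hm]
  set m : Nat := min s1.length s2.length with hmdef
  have hm1 : m ≤ s1.length := Nat.min_le_left _ _
  have hm2 : m ≤ s2.length := Nat.min_le_right _ _
  -- the paired loop over range(0, minSize)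
  have first : (PySem.List.pyRange 0 (m : Int) 1).foldl
      (fun add i => add ++ [PySem.List.pyGetD s1 i 0 + PySem.List.pyGetD s2 i 0]) []
      = (List.range m).map (fun k => s1.getD k 0 + s2.getD k 0) := by
    rw [PySem.List.foldl_append_singleton_eq_map]
    simp [PySem.List.pyRange_one, List.map_map, Function.comp_def]
  -- each tail loop appends the corresponding drop
  have tail : ∀ (s : List Int) (acc : List Int),
      (PySem.List.pyRange (m : Int) (s.length : Int) 1).foldl
        (fun add i => add ++ [PySem.List.pyGetD s i 0]) acc
      = acc ++ s.drop m := by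
    intro s acc
    rw [PySem.List.foldl_append_singleton_eq_map]
    have h := PySem.List.map_pyGetD_pyRange s 0 (Int.natCast_nonneg m)
    simp only [PySem.List.len_eq, Int.toNat_natCast] at h
    rw [h]
  rw [first, alt_eq, ← range_map_eq_zipWith, ← hmdef]
  have hd1 : ¬ ((m : Int) < (s1.length : Int)) → s1.drop m = [] := by
    intro h; apply List.drop_eq_nil_of_le; omega
  have hd2 : ¬ ((m : Int) < (s2.length : Int)) → s2.drop m = [] := by
    intro h; apply List.drop_eq_nil_of_le; omega
  split_ifs with h1 h2 h2
  · exfalso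
    have : (m : Int) = min (s1.length : Int) (s2.length : Int) := by rw [hmdef]; push_cast; rfl
    omega
  · rw [tail s2, hd1 h2]; simp
  · rw [tail s1, hd2 h1]; simp
  · rw [hd1 h2, hd2 h1]; simp
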